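-- pv_equiv track=rewrite | github.com/JangYouJung/AlgorithmStudy | 최애림/6주차/[공통]도넛과 막대 그래프.py | make_inout_dict
-- ===== SOURCE A (Python) =====
-- def make_inout_dict(edges):
--     inout_dict = {}
--     for edge in edges:
--         node1 = edge[0]  # out
--         node2 = edge[1]  # in
--
--         if not node1 in inout_dict:
--             inout_dict[node1] = [0, 0]
--
--         if not node2 in inout_dict:
--             inout_dict[node2] = [0, 0]
--
--         inout_dict[node1][0] += 1  # out
--         inout_dict[node2][1] += 1  # in
--
--     return inout_dict
-- ===== SOURCE B (Python) =====
-- def make_inout_dict(edges):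
--     outc = {}
--     inc = {}
--     for a, _ in edges:
--         outc[a] = outc.get(a, 0) + 1
--     for _, b in edges:
--         inc[b] = inc.get(b, 0) + 1
--     nodes = dict.fromkeys(x for e in edges for x in e)
--     return {n: [outc.get(n, 0), inc.get(n, 0)] for n in nodes}
-- ===== Notes on version B (the rewrite author's own statement) =====
-- stated objective: idiomatic
-- what changed: Replaces A's single interleaved pass that conditionally initialises and mutates [out,in] list cells per edge with a count-then-merge decomposition: two counting passes (out-degrees over first components, in-degrees over second components), keys deduplicated in first-encounter order via dict.fromkeys, and the result dict built in one comprehension with .get(node, 0) defaults.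
import Mathlib
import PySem

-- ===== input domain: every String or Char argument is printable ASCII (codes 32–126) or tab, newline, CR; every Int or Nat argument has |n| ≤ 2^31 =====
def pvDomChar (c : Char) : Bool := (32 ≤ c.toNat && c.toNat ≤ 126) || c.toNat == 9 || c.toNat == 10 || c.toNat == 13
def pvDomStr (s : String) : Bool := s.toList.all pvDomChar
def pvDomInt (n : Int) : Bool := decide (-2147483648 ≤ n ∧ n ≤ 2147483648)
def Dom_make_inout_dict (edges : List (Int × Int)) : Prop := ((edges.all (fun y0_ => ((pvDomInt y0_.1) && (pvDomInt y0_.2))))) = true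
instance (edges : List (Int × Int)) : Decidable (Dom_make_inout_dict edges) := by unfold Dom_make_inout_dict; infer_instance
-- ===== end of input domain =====

-- B replaces A's single interleaved initialise-and-mutate pass by a count-then-merge
-- decomposition (two degree counters, then one merge over the deduplicated keys); objective: idiomatic.

-- ===== PORT A =====
-- loop body of A's single pass (named so the fold can be reasoned about);
-- 'inout_dict[node][j] += 1' is rendered as List.set j (getD j + 1), exact since the stored lists always have length 2
def aStep (d : PySem.Dict Int (List Int)) (edge : Int × Int) : PySem.Dict Int (List Int) :=
  let node1 := edge.1
  let node2 := edge.2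
  let d := if ¬ d.contains node1 then d.insert node1 [0, 0] else d
  let d := if ¬ d.contains node2 then d.insert node2 [0, 0] else d
  let d := d.modify node1 [] (fun l => l.set 0 (l.getD 0 0 + 1))
  d.modify node2 [] (fun l => l.set 1 (l.getD 1 0 + 1))

def make_inout_dict (edges : List (Int × Int)) : List (Int × List Int) :=
  (edges.foldl aStep PySem.Dict.empty).items

-- ===== PORT B =====
def make_inout_dict_alt (edges : List (Int × Int)) : List (Int × List Int) :=
  let outc := edges.foldl (fun d e => d.modify e.1 0 (fun c => c + 1)) PySem.Dict.empty
  let inc := edges.foldl (fun d e => d.modify e.2 0 (fun c => c + 1)) PySem.Dict.empty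
  let nodes := PySem.List.dedup (edges.flatMap (fun e => [e.1, e.2]))
  nodes.map (fun n => (n, [outc.getD n 0, inc.getD n 0]))

-- ===== PRECONDITION & SPEC =====
def Spec_make_inout_dict (edges : List (Int × Int)) (out : List (Int × List Int)) : Prop := out = make_inout_dict_alt edges
instance (edges : List (Int × Int)) (out : List (Int × List Int)) : Decidable (Spec_make_inout_dict edges out) := by unfold Spec_make_inout_dict; infer_instance

-- ===== CLAIM (what is proved, stated in full; the proofs are below) =====
def Claim_equal_make_inout_dict : Prop := ∀ (edges : List (Int × Int)), Dom_make_inout_dict edges → Spec_make_inout_dict edges (make_inout_dict edges)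

-- ===== LEMMAS AND PROOFS =====

-- out-degree / in-degree counts of a prefix of edges
def cntO (p : List (Int × Int)) (n : Int) : Int := ((p.map Prod.fst).count n : Int)
def cntI (p : List (Int × Int)) (n : Int) : Int := ((p.map Prod.snd).count n : Int)

theorem find?_mapkeys (K : List Int) (g : Int → List Int) (x : Int) :
    List.find? (fun p => p.1 == x) (K.map fun n => (n, g n)) = if x ∈ K then some (x, g x) else none := by
  induction K with
  | nil => simp
  | cons h t ih =>
    by_cases hx : h = x
    · subst hx
      rw [List.map_cons, List.find?_cons_of_pos (by simp)]
      simp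
    · rw [List.map_cons, List.find?_cons_of_neg (by simp [hx]), ih]
      have hne : ¬ x = h := fun h' => hx h'.symm
      by_cases hxt : x ∈ t <;> simp [hxt, hne]

theorem dict_get?_mapkeys (K : List Int) (g : Int → List Int) (x : Int) :
    (PySem.Dict.mk (K.map fun n => (n, g n))).get? x = if x ∈ K then some (g x) else none := by
  simp only [PySem.Dict.get?, find?_mapkeys]
  by_cases hx : x ∈ K <;> simp [hx]

theorem dict_contains_mapkeys (K : List Int) (g : Int → List Int) (x : Int) :
    (PySem.Dict.mk (K.map fun n => (n, g n))).contains x = decide (x ∈ K) := by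
  induction K with
  | nil => simp [PySem.Dict.contains]
  | cons h t ih =>
    simp only [PySem.Dict.contains, List.map_cons, List.any_cons] at ih ⊢
    by_cases hx : h = x
    · subst hx; simp
    · have hne : ¬ x = h := fun h' => hx h'.symm
      simp [hx, hne, ih]

theorem dict_insert_mapkeys_mem (K : List Int) (g : Int → List Int) (x : Int) (v : List Int)
    (hx : x ∈ K) :
    (PySem.Dict.mk (K.map fun n => (n, g n))).insert x v
      = PySem.Dict.mk (K.map fun n => (n, if n = x then v else g n)) := by
  simp only [PySem.Dict.insert, dict_contains_mapkeys, hx, decide_true, if_true]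
  congr 1
  rw [List.map_map]
  apply List.map_congr_left
  intro n _
  by_cases hnx : n = x <;> simp [hnx]

theorem dict_insert_mapkeys_not_mem (K : List Int) (g : Int → List Int) (x : Int) (v : List Int)
    (hx : x ∉ K) :
    (PySem.Dict.mk (K.map fun n => (n, g n))).insert x v
      = PySem.Dict.mk ((K ++ [x]).map fun n => (n, if n = x then v else g n)) := by
  simp only [PySem.Dict.insert, dict_contains_mapkeys, hx, decide_false, Bool.false_eq_true,
    if_false, List.map_append, List.map_cons, List.map_nil, if_true]
  have hmap : List.map (fun n => (n, g n)) K
      = List.map (fun n => (n, if n = x then v else g n)) K := by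
    apply List.map_congr_left
    intro n hn
    have : n ≠ x := fun h => hx (h ▸ hn)
    simp [this]
  rw [hmap]

theorem dict_modify_mapkeys_mem (K : List Int) (g : Int → List Int) (x : Int) (dflt : List Int)
    (f : List Int → List Int) (hx : x ∈ K) :
    (PySem.Dict.mk (K.map fun n => (n, g n))).modify x dflt f
      = PySem.Dict.mk (K.map fun n => (n, if n = x then f (g x) else g n)) := by
  unfold PySem.Dict.modify
  rw [show (PySem.Dict.mk (K.map fun n => (n, g n))).getD x dflt = g x by
        simp [PySem.Dict.getD, dict_get?_mapkeys, hx]]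
  exact dict_insert_mapkeys_mem K g x (f (g x)) hx

-- effect of A's loop body on a dict in the model shape (o/i vanish outside the key list)
theorem aStep_model (K : List Int) (o i : Int → Int) (a b : Int)
    (ho : ∀ n, n ∉ K → o n = 0) (hi : ∀ n, n ∉ K → i n = 0) :
    aStep (PySem.Dict.mk (K.map fun n => (n, [o n, i n]))) (a, b)
      = PySem.Dict.mk ((PySem.Set.add (PySem.Set.add K a) b).map
          fun n => (n, [o n + (if n = a then 1 else 0), i n + (if n = b then 1 else 0)])) := by
  have h1 : (if ¬ (PySem.Dict.mk (K.map fun n => (n, [o n, i n]))).contains a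
        then (PySem.Dict.mk (K.map fun n => (n, [o n, i n]))).insert a [0, 0]
        else PySem.Dict.mk (K.map fun n => (n, [o n, i n])))
      = PySem.Dict.mk ((PySem.Set.add K a).map fun n => (n, [o n, i n])) := by
    by_cases ha : a ∈ K
    · simp [ha]
    · rw [if_pos (by rw [dict_contains_mapkeys]; simpa using ha),
        dict_insert_mapkeys_not_mem K _ a [0,0] ha, PySem.Set.add_of_not_mem ha]
      congr 1
      apply List.map_congr_left
      intro n hn
      by_cases hna : n = a
      · subst hna; simp [ho n ha, hi n ha]
      · simp [hna]
  set K2 := PySem.Set.add (PySem.Set.add K a) b with hK2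
  have h2 : (if ¬ (PySem.Dict.mk ((PySem.Set.add K a).map fun n => (n, [o n, i n]))).contains b
        then (PySem.Dict.mk ((PySem.Set.add K a).map fun n => (n, [o n, i n]))).insert b [0, 0]
        else PySem.Dict.mk ((PySem.Set.add K a).map fun n => (n, [o n, i n])))
      = PySem.Dict.mk (K2.map fun n => (n, [o n, i n])) := by
    by_cases hb : b ∈ PySem.Set.add K a
    · have hc : (PySem.Dict.mk ((PySem.Set.add K a).map fun n => (n, [o n, i n]))).contains b
          = true := by rw [dict_contains_mapkeys]; exact decide_eq_true hb
      rw [if_neg (not_not_intro hc), hK2, PySem.Set.add_of_mem hb]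
    · have hbK : b ∉ K := fun h => hb ((PySem.Set.mem_add K a b).2 (Or.inl h))
      rw [if_pos (by rw [dict_contains_mapkeys]; simpa using hb),
        dict_insert_mapkeys_not_mem _ _ b [0,0] hb, hK2, PySem.Set.add_of_not_mem hb]
      congr 1
      apply List.map_congr_left
      intro n hn
      by_cases hnb : n = b
      · subst hnb; simp [ho n hbK, hi n hbK]
      · simp [hnb]
  have haK2 : a ∈ K2 := by
    rw [hK2, PySem.Set.mem_add]
    exact Or.inl ((PySem.Set.mem_add K a a).2 (Or.inr rfl))
  have hbK2 : b ∈ K2 := by rw [hK2, PySem.Set.mem_add]; exact Or.inr rfl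
  show aStep _ (a, b) = _
  unfold aStep
  simp only []
  rw [h1, h2,
    dict_modify_mapkeys_mem K2 _ a [] _ haK2]
  have h3 : (PySem.Dict.mk (K2.map fun n =>
        (n, if n = a then List.set [o a, i a] 0 ((List.getD [o a, i a] 0 0) + 1) else [o n, i n])))
      = PySem.Dict.mk (K2.map fun n => (n, if n = a then [o a + 1, i a] else [o n, i n])) := by
    simp [List.getD]
  rw [h3, dict_modify_mapkeys_mem K2 _ b [] _ hbK2]
  congr 1
  apply List.map_congr_left
  intro n hn
  by_cases hnb : n = b <;> by_cases hna : n = a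
  · subst hnb; subst hna; simp [List.getD]
  · subst hnb; simp [hna, List.getD]
  · subst hna; simp [hnb]
  · simp [hna, hnb]

-- the loop invariant of A's pass: the dict holds exactly the keys seen so far, in first-encounter
-- order, each mapped to its [out, in] degree counts over the processed prefix
theorem foldA_model (p : List (Int × Int)) :
    p.foldl aStep PySem.Dict.empty
      = PySem.Dict.mk ((PySem.Set.ofList (p.flatMap fun e => [e.1, e.2])).map
          fun n => (n, [cntO p n, cntI p n])) := by
  induction p using List.reverseRecOn with
  | nil => rfl
  | append_singleton p e ih =>
    obtain ⟨a, b⟩ := e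
    rw [List.foldl_append, List.foldl_cons, List.foldl_nil, ih,
      aStep_model _ (cntO p) (cntI p) a b
        (fun n hn => by
          simp only [PySem.Set.mem_ofList] at hn
          simp only [cntO, List.count_eq_zero, Int.natCast_eq_zero]
          intro hmem
          rcases List.mem_map.1 hmem with ⟨e, he, rfl⟩
          exact hn (List.mem_flatMap.2 ⟨e, he, by simp⟩))
        (fun n hn => by
          simp only [PySem.Set.mem_ofList] at hn
          simp only [cntI, List.count_eq_zero, Int.natCast_eq_zero]
          intro hmem
          rcases List.mem_map.1 hmem with ⟨e, he, rfl⟩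
          exact hn (List.mem_flatMap.2 ⟨e, he, by simp⟩))]
    have hkeys : PySem.Set.ofList ((p ++ [(a, b)]).flatMap fun e => [e.1, e.2])
        = PySem.Set.add (PySem.Set.add (PySem.Set.ofList (p.flatMap fun e => [e.1, e.2])) a) b := by
      rw [List.flatMap_append, PySem.Set.ofList_append]
      simp [PySem.Set.update_cons, PySem.Set.update_nil]
    rw [hkeys]
    congr 1
    apply List.map_congr_left
    intro n hn
    have hO : cntO (p ++ [(a, b)]) n = cntO p n + (if n = a then 1 else 0) := by
      simp only [cntO, List.map_append, List.count_append]
      by_cases hna : n = a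
      · subst hna; simp
      · have : ¬ a = n := fun h => hna h.symm
        simp [hna, this]
    have hI : cntI (p ++ [(a, b)]) n = cntI p n + (if n = b then 1 else 0) := by
      simp only [cntI, List.map_append, List.count_append]
      by_cases hnb : n = b
      · subst hnb; simp
      · have : ¬ b = n := fun h => hnb h.symm
        simp [hnb, this]
    rw [hO, hI]

theorem counter_fst (edges : List (Int × Int)) (n : Int) :
    (edges.foldl (fun d e => d.modify e.1 0 (fun c => c + 1)) PySem.Dict.empty).getD n 0
      = cntO edges n := by
  rw [← List.foldl_map (f := Prod.fst)
      (g := fun (d : PySem.Dict Int Int) x => d.modify x 0 (fun c => c + 1)),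
    PySem.Dict.getD_foldl_modify_add_one]
  simp [cntO, PySem.Dict.getD, PySem.Dict.get?, PySem.Dict.empty, List.count_eq_countP]

theorem counter_snd (edges : List (Int × Int)) (n : Int) :
    (edges.foldl (fun d e => d.modify e.2 0 (fun c => c + 1)) PySem.Dict.empty).getD n 0
      = cntI edges n := by
  rw [← List.foldl_map (f := Prod.snd)
      (g := fun (d : PySem.Dict Int Int) x => d.modify x 0 (fun c => c + 1)),
    PySem.Dict.getD_foldl_modify_add_one]
  simp [cntI, PySem.Dict.getD, PySem.Dict.get?, PySem.Dict.empty, List.count_eq_countP]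

-- ===== VERDICT (by name: the statement is the Claim_ definition above) =====
theorem make_inout_dict_spec : Claim_equal_make_inout_dict := by
  intro edges _
  unfold Spec_make_inout_dict make_inout_dict make_inout_dict_alt
  rw [foldA_model]
  simp only [PySem.List.dedup_eq_ofList]
  apply List.map_congr_left
  intro n _
  rw [counter_fst, counter_snd]
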